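-- pv_equiv track=rewrite | github.com/NekyuuYa/ShinBot | shinbot/agent/media/fingerprint.py | _dhash_channel
-- ===== SOURCE A (Python) =====
-- def _dhash_channel(pixels: list[int], width: int, hash_size: int) -> str:
--     difference: list[bool] = []
--     for row in range(hash_size):
--         row_offset = row * width
--         for col in range(hash_size):
--             left = pixels[row_offset + col]
--             right = pixels[row_offset + col + 1]
--             difference.append(left > right)
--
--     hex_string = ""
--     for index in range(0, len(difference), 4):
--         chunk = difference[index : index + 4]
--         decimal_val = sum(int(bit) << shift for shift, bit in enumerate(chunk))
--         hex_string += hex(decimal_val)[2:]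
--     return hex_string
-- ===== SOURCE B (Python) =====
-- def _dhash_channel(pixels: list[int], width: int, hash_size: int) -> str:
--     parts = []
--     i = 0
--     acc = 0
--     for row in range(hash_size):
--         base = row * width
--         for col in range(hash_size):
--             if pixels[base + col] > pixels[base + col + 1]:
--                 acc += 1 << (i % 4)
--             if i % 4 == 3:
--                 parts.append(hex(acc)[2:])
--                 acc = 0
--             i += 1
--     if i % 4 != 0:
--         parts.append(hex(acc)[2:])
--     return "".join(parts)
-- ===== Notes on version B (the rewrite author's own statement) =====
-- stated objective: alternative
-- what changed: Fused A's two phases (materialize the full boolean difference list, then re-scan it in 4-bit slices) into one streaming pass that keeps a global bit counter and a nibble accumulator and emits each hex digit as soon as its nibble completes, flushing a trailing partial nibble; no intermediate list is built.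
import Mathlib
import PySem

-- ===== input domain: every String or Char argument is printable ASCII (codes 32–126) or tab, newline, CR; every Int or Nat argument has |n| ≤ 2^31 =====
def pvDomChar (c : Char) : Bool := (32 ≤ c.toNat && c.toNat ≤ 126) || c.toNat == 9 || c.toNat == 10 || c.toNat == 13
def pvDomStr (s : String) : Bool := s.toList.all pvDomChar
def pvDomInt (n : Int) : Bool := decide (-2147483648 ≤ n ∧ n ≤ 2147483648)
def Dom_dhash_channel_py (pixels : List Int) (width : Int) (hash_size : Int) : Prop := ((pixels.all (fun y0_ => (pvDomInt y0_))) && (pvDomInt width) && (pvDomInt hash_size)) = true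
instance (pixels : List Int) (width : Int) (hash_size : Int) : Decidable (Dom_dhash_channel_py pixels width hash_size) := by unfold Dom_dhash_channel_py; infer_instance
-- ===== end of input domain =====

-- B fuses A's two phases (build a boolean list, then hex it 4 bits at a time) into one
-- streaming pass with a bit counter and a nibble accumulator; same return value, no
-- intermediate list (objective: alternative decomposition).

-- ===== PORT A =====
-- hex(n)[2:] for a nibble 0 ≤ n ≤ 15 — the only values either Python passes to hex()
def pvHexDigit (n : Int) : String :=
  String.singleton (Char.ofNat (if n < 10 then (48 + n).toNat else (87 + n).toNat))

def dhash_channel_py (pixels : List Int) (width : Int) (hash_size : Int) : String :=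
  let difference : List Bool :=
    (PySem.List.pyRange 0 hash_size 1).foldl (fun diff row =>
      let row_offset := row * width
      (PySem.List.pyRange 0 hash_size 1).foldl (fun diff col =>
        let left := PySem.List.pyGetD pixels (row_offset + col) 0
        let right := PySem.List.pyGetD pixels (row_offset + col + 1) 0
        diff ++ [decide (left > right)]) diff) []
  (PySem.List.pyRange 0 (difference.length : Int) 4).foldl (fun hex_string index =>
    let chunk := PySem.List.slice difference (some index) (some (index + 4))
    -- int(bit) << shift  (shift = position in the chunk, always ≥ 0: exact as 2^shift)
    let decimal_val := ((PySem.List.enumerate chunk 0).map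
      (fun p => (if p.2 then (1 : Int) else 0) * 2 ^ p.1.toNat)).sum
    hex_string ++ pvHexDigit decimal_val) ""

-- ===== PORT B =====
def dhash_channel_py_alt (pixels : List Int) (width : Int) (hash_size : Int) : String :=
  let s :=
    (PySem.List.pyRange 0 hash_size 1).foldl (fun s row =>
      let base := row * width
      (PySem.List.pyRange 0 hash_size 1).foldl (fun s col =>
        -- state s = (i, acc, parts); 1 << (i % 4) is exact as 2^(i%4) since i ≥ 0
        let acc := if PySem.List.pyGetD pixels (base + col) 0 >
                      PySem.List.pyGetD pixels (base + col + 1) 0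
                   then s.2.1 + 2 ^ (PySem.Int.mod s.1 4).toNat else s.2.1
        if PySem.Int.mod s.1 4 = 3 then (s.1 + 1, 0, s.2.2 ++ [pvHexDigit acc])
        else (s.1 + 1, acc, s.2.2)) s)
      ((0 : Int), (0 : Int), ([] : List String))
  let parts := if PySem.Int.mod s.1 4 ≠ 0 then s.2.2 ++ [pvHexDigit s.2.1] else s.2.2
  String.join parts

-- ===== PRECONDITION & SPEC =====
-- Pre_ excludes exactly the inputs on which A raises IndexError: some accessed index
-- row*width+col or row*width+col+1 outside [-len(pixels), len(pixels)); since row*width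
-- is linear in row, its extrema over 0 ≤ row < hash_size are at row = 0 and row = hash_size-1.
def Pre_dhash_channel_py (pixels : List Int) (width : Int) (hash_size : Int) : Prop :=
  0 < hash_size →
    (-(pixels.length : Int) ≤ min 0 ((hash_size - 1) * width) ∧
     max 0 ((hash_size - 1) * width) + hash_size < (pixels.length : Int))
instance (pixels : List Int) (width : Int) (hash_size : Int) : Decidable (Pre_dhash_channel_py pixels width hash_size) := by unfold Pre_dhash_channel_py; infer_instance

def pvWitness_dhash_channel_py : List Int × Int × Int := ([9, 8, 7, 6, 5, 4], 3, 2)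

def Spec_dhash_channel_py (pixels : List Int) (width : Int) (hash_size : Int) (out : String) : Prop := out = dhash_channel_py_alt pixels width hash_size
instance (pixels : List Int) (width : Int) (hash_size : Int) (out : String) : Decidable (Spec_dhash_channel_py pixels width hash_size out) := by unfold Spec_dhash_channel_py; infer_instance

-- ===== CLAIM (what is proved, stated in full; the proofs are below) =====
def Claim_equal_dhash_channel_py : Prop := ∀ (pixels : List Int) (width : Int) (hash_size : Int), Dom_dhash_channel_py pixels width hash_size → Pre_dhash_channel_py pixels width hash_size → Spec_dhash_channel_py pixels width hash_size (dhash_channel_py pixels width hash_size)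

-- ===== LEMMAS AND PROOFS =====

-- range(a, b, 4) as a structural recursion
theorem pvRange4_nil (a b : Int) (h : b ≤ a) : PySem.List.pyRange a b 4 = [] := by
  rw [PySem.List.pyRange_of_pos a b (by norm_num)]
  simp [show ¬ a < b by omega]

theorem pvRange4_cons (a b : Int) (h : a < b) :
    PySem.List.pyRange a b 4 = a :: PySem.List.pyRange (a + 4) b 4 := by
  rw [PySem.List.pyRange_of_pos a b (by norm_num), PySem.List.pyRange_of_pos (a+4) b (by norm_num)]
  simp only [if_pos h]
  have hc : ((b - a + 4 - 1) / 4).toNat = ((if a + 4 < b then ((b - (a+4) + 4 - 1) / 4).toNat else 0)) + 1 := by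
    split_ifs with h2 <;> omega
  rw [hc, List.range_succ_eq_map, List.map_cons, List.map_map]
  refine congrArg₂ _ (by ring) (List.map_congr_left ?_)
  intro k _; simp [Function.comp]; ring

-- the value of a ≤4-bit chunk
def pvDec (chunk : List Bool) : Int :=
  ((PySem.List.enumerate chunk 0).map (fun p => (if p.2 then (1 : Int) else 0) * 2 ^ p.1.toNat)).sum

-- the comparison bit both programs compute at (row, col)
def pvBit (pixels : List Int) (width row col : Int) : Bool :=
  decide (PySem.List.pyGetD pixels (row * width + col) 0 > PySem.List.pyGetD pixels (row * width + col + 1) 0)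

-- the difference list, row-major
def pvBits (pixels : List Int) (width hash_size : Int) : List Bool :=
  (PySem.List.pyRange 0 hash_size 1).flatMap (fun row =>
    (PySem.List.pyRange 0 hash_size 1).map (fun col => pvBit pixels width row col))

-- the common result: one hex digit per 4-bit chunk, last chunk possibly short
def pvChunks : List Bool → List String
  | [] => []
  | b :: t => pvHexDigit (pvDec ((b :: t).take 4)) :: pvChunks (t.drop 3)
termination_by L => L.length
decreasing_by simp

theorem pvJoinFold : ∀ (l : List String) (s : String), List.foldl (· ++ ·) s l = s ++ String.join l := by
  intro l
  induction l with
  | nil => intro s; simp [String.join]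
  | cons x t ih =>
    intro s
    show List.foldl (· ++ ·) (s ++ x) t = s ++ String.join (x :: t)
    rw [ih]
    show s ++ x ++ String.join t = s ++ List.foldl (· ++ ·) ("" ++ x) t
    rw [ih ("" ++ x)]
    simp [String.append_assoc]

theorem pvJoinCons (a : String) (l : List String) : String.join (a :: l) = a ++ String.join l := by
  show List.foldl (· ++ ·) ("" ++ a) l = _
  rw [pvJoinFold]; simp

-- a string-append loop is the join of the map
theorem pvStrFold (f : Int → String) (l : List Int) : ∀ s : String,
    l.foldl (fun hs i => hs ++ f i) s = s ++ String.join (l.map f) := by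
  induction l with
  | nil => intro s; simp [String.join]
  | cons x t ih =>
    intro s
    simp only [List.foldl_cons, List.map_cons, pvJoinCons]
    rw [ih]
    simp [String.append_assoc]

-- A's hex phase, one chunk of ≤4 at a time
theorem pvAHexGen : ∀ (n : Nat) (L : List Bool), L.length ≤ n → ∀ (M : List Bool),
    (PySem.List.pyRange (M.length : Int) ((M.length : Int) + L.length) 4).map
      (fun index => pvHexDigit (pvDec (PySem.List.slice (M ++ L) (some index) (some (index + 4))))) = pvChunks L := by
  intro n
  induction n with
  | zero =>
    intro L hL M
    have : L = [] := List.eq_nil_of_length_eq_zero (by omega)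
    subst this
    rw [show ((M.length : Int) + ([] : List Bool).length) = (M.length : Int) by simp]
    rw [pvRange4_nil _ _ le_rfl]
    simp [pvChunks]
  | succ n ih =>
    intro L hL M
    match L with
    | [] =>
      rw [show ((M.length : Int) + ([] : List Bool).length) = (M.length : Int) by simp]
      rw [pvRange4_nil _ _ le_rfl]
      simp [pvChunks]
    | b :: t =>
      rw [pvRange4_cons _ _ (by simp), List.map_cons]
      have hhead : PySem.List.slice (M ++ b :: t) (some (M.length : Int)) (some ((M.length : Int) + 4)) = (b :: t).take 4 := by
        rw [show ((M.length : Int) + 4) = ((M.length : Int) + ((4 : Nat) : Int)) by norm_num,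
            PySem.List.slice_natCast_add, List.drop_left]
      rw [hhead]
      show _ :: _ = pvChunks (b :: t)
      rw [pvChunks]
      congr 1
      by_cases hle : (b :: t).length ≤ 4
      · rw [pvRange4_nil _ _ (by omega)]
        have ht : t.drop 3 = [] := List.drop_eq_nil_of_le (by simp at hle ⊢; omega)
        simp [ht, pvChunks]
      · have h5 : 5 ≤ (b :: t).length := by omega
        simp only [List.length_cons] at h5
        have := ih (t.drop 3) (by simp only [List.length_drop, List.length_cons] at hL ⊢; omega) (M ++ (b :: t).take 4)
        have hlen : ((M ++ (b :: t).take 4).length : Int) = (M.length : Int) + 4 := by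
          simp; omega
        have hlist : (M ++ (b :: t).take 4) ++ (t.drop 3) = M ++ b :: t := by
          rw [List.append_assoc]
          congr 1
          show (b :: t).take 4 ++ (b :: t).drop 4 = b :: t
          exact List.take_append_drop 4 (b :: t)
        rw [hlen, hlist] at this
        rw [show ((M.length : Int) + ((b :: t).length : Int)) = ((M.length : Int) + 4) + ((t.drop 3).length : Int) by simp only [List.length_cons, List.length_drop] at h5 ⊢; omega]
        exact this

theorem pvAHex (L : List Bool) :
    (PySem.List.pyRange 0 (L.length : Int) 4).map
      (fun index => pvHexDigit (pvDec (PySem.List.slice L (some index) (some (index + 4))))) = pvChunks L := by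
  simpa using pvAHexGen L.length L le_rfl []

-- A computes join (pvChunks (pvBits …))
theorem pvAEq (pixels : List Int) (width hash_size : Int) :
    dhash_channel_py pixels width hash_size = String.join (pvChunks (pvBits pixels width hash_size)) := by
  unfold dhash_channel_py
  dsimp only
  rw [show (PySem.List.pyRange 0 hash_size 1).foldl (fun diff row =>
      (PySem.List.pyRange 0 hash_size 1).foldl (fun diff col =>
        diff ++ [decide (PySem.List.pyGetD pixels (row * width + col) 0 >
                 PySem.List.pyGetD pixels (row * width + col + 1) 0)]) diff) [] = pvBits pixels width hash_size from ?_]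
  · rw [pvStrFold (fun index => pvHexDigit (((PySem.List.enumerate (PySem.List.slice (pvBits pixels width hash_size) (some index) (some (index + 4))) 0).map (fun p => (if p.2 then (1 : Int) else 0) * 2 ^ p.1.toNat)).sum))]
    · have := pvAHex (pvBits pixels width hash_size)
      simp only [pvDec] at this
      rw [this]; simp
  · unfold pvBits pvBit
    simp only [PySem.List.foldl_append_singleton_eq_map]
    rw [PySem.List.foldl_append_eq_flatMap]
    simp

-- B's step on one bit, and the final flush
def pvStep (s : Int × Int × List String) (b : Bool) : Int × Int × List String :=
  let acc := if b then s.2.1 + 2 ^ (s.1 % 4).toNat else s.2.1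
  if s.1 % 4 = 3 then (s.1 + 1, 0, s.2.2 ++ [pvHexDigit acc]) else (s.1 + 1, acc, s.2.2)

def pvFlush (s : Int × Int × List String) : List String :=
  if s.1 % 4 ≠ 0 then s.2.2 ++ [pvHexDigit s.2.1] else s.2.2

theorem pvStepLow (i acc : Int) (parts : List String) (b : Bool) (h : i % 4 ≠ 3) :
    pvStep (i, acc, parts) b = (i + 1, (if b then acc + 2 ^ ((i % 4).toNat) else acc), parts) := by
  simp [pvStep, h]

theorem pvStepHigh (i acc : Int) (parts : List String) (b : Bool) (h : i % 4 = 3) :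
    pvStep (i, acc, parts) b = (i + 1, 0, parts ++ [pvHexDigit (if b then acc + 8 else acc)]) := by
  simp [pvStep, h]

-- B's loop invariant: at a nibble boundary the flushed output is parts ++ pvChunks L
theorem pvBLoop : ∀ (n : Nat) (L : List Bool), L.length ≤ n → ∀ (i : Int), 0 ≤ i → i % 4 = 0 →
    ∀ parts : List String, pvFlush (L.foldl pvStep (i, 0, parts)) = parts ++ pvChunks L := by
  intro n
  induction n with
  | zero =>
    intro L hL i hi h0 parts
    have : L = [] := List.eq_nil_of_length_eq_zero (by omega)
    subst this
    simp [pvFlush, pvChunks, h0]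
  | succ n ih =>
    intro L hL i hi h0 parts
    have e0 : (i % 4).toNat = 0 := by omega
    have e1 : ((i + 1) % 4).toNat = 1 := by omega
    have e2 : ((i + 1 + 1) % 4).toNat = 2 := by omega
    match L with
    | [] => simp [pvFlush, pvChunks, h0]
    | [b1] =>
      simp only [List.foldl_cons, List.foldl_nil]
      rw [pvStepLow i 0 parts b1 (by omega), e0]
      simp only [pvFlush]
      rw [if_pos (by omega : (i + 1) % 4 ≠ 0)]
      cases b1 <;> simp [pvChunks, pvDec, PySem.List.enumerate_cons, PySem.List.enumerate_nil]
    | [b1, b2] =>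
      simp only [List.foldl_cons, List.foldl_nil]
      rw [pvStepLow i 0 parts b1 (by omega), e0,
          pvStepLow (i+1) _ parts b2 (by omega : (i+1) % 4 ≠ 3), e1]
      simp only [pvFlush]
      rw [if_pos (by omega : (i + 1 + 1) % 4 ≠ 0)]
      cases b1 <;> cases b2 <;> simp [pvChunks, pvDec, PySem.List.enumerate_cons, PySem.List.enumerate_nil]
    | [b1, b2, b3] =>
      simp only [List.foldl_cons, List.foldl_nil]
      rw [pvStepLow i 0 parts b1 (by omega), e0,
          pvStepLow (i+1) _ parts b2 (by omega : (i+1) % 4 ≠ 3), e1,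
          pvStepLow (i+1+1) _ parts b3 (by omega : (i+1+1) % 4 ≠ 3), e2]
      simp only [pvFlush]
      rw [if_pos (by omega : (i + 1 + 1 + 1) % 4 ≠ 0)]
      cases b1 <;> cases b2 <;> cases b3 <;> simp [pvChunks, pvDec, PySem.List.enumerate_cons, PySem.List.enumerate_nil]
    | b1 :: b2 :: b3 :: b4 :: rest =>
      simp only [List.foldl_cons]
      rw [pvStepLow i 0 parts b1 (by omega), e0,
          pvStepLow (i+1) _ parts b2 (by omega : (i+1) % 4 ≠ 3), e1,
          pvStepLow (i+1+1) _ parts b3 (by omega : (i+1+1) % 4 ≠ 3), e2,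
          pvStepHigh (i+1+1+1) _ parts b4 (by omega : (i+1+1+1) % 4 = 3)]
      rw [ih rest (by simp only [List.length_cons] at hL; omega) (i+1+1+1+1) (by omega) (by omega)]
      rw [show pvChunks (b1 :: b2 :: b3 :: b4 :: rest) = pvHexDigit (pvDec [b1, b2, b3, b4]) :: pvChunks rest from by
        rw [pvChunks]; rfl]
      rw [List.append_assoc, List.singleton_append]
      cases b1 <;> cases b2 <;> cases b3 <;> cases b4 <;> simp [pvDec, PySem.List.enumerate_cons, PySem.List.enumerate_nil]

-- B computes join (pvFlush (fold pvStep over pvBits …))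
theorem pvBEq (pixels : List Int) (width hash_size : Int) :
    dhash_channel_py_alt pixels width hash_size =
      String.join (pvFlush ((pvBits pixels width hash_size).foldl pvStep (0, 0, []))) := by
  unfold dhash_channel_py_alt pvFlush pvBits
  dsimp only
  rw [List.flatMap_def, List.foldl_flatten]
  simp only [List.foldl_map]
  have hmod : ∀ a : Int, PySem.Int.mod a 4 = a % 4 :=
    fun a => PySem.Int.mod_eq_emod_of_pos (by norm_num)
  simp only [hmod]
  have hXY : List.foldl
      (fun (s : Int × Int × List String) (row : Int) =>
        List.foldl
          (fun (s : Int × Int × List String) (col : Int) =>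
            if s.1 % 4 = 3 then
              (s.1 + 1, 0,
                s.2.2 ++
                  [pvHexDigit
                      (if PySem.List.pyGetD pixels (row * width + col) 0 >
                            PySem.List.pyGetD pixels (row * width + col + 1) 0 then
                        s.2.1 + 2 ^ (s.1 % 4).toNat
                      else s.2.1)])
            else
              (s.1 + 1,
                if PySem.List.pyGetD pixels (row * width + col) 0 >
                      PySem.List.pyGetD pixels (row * width + col + 1) 0 then
                  s.2.1 + 2 ^ (s.1 % 4).toNat
                else s.2.1,
                s.2.2))
          s (PySem.List.pyRange 0 hash_size 1))
      ((0 : Int), (0 : Int), ([] : List String)) (PySem.List.pyRange 0 hash_size 1)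
    = List.foldl
        (fun x y => List.foldl (fun x y_1 => pvStep x (pvBit pixels width y y_1)) x (PySem.List.pyRange 0 hash_size 1))
        ((0 : Int), (0 : Int), ([] : List String)) (PySem.List.pyRange 0 hash_size 1) := by
    apply PySem.List.foldl_congr_mem
    intro acc row _
    apply PySem.List.foldl_congr_mem
    intro acc2 col _
    simp [pvStep, pvBit]
  rw [hXY]

-- ===== VERDICT (by name: the statement is the Claim_ definition above) =====
theorem dhash_channel_py_spec : Claim_equal_dhash_channel_py := by
  intro pixels width hash_size _ _
  unfold Spec_dhash_channel_py
  rw [pvAEq, pvBEq, pvBLoop (pvBits pixels width hash_size).length _ le_rfl 0 (by norm_num) (by norm_num)]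
  simp
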